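-- pv_equiv track=rewrite | github.com/creatoryoon/CSE2003_1_2021_1_Sogang_- | project/puzzle_student.py | find_0_loc
-- ===== SOURCE A (Python) =====
-- def find_0_loc(puzzle):
--
-- #TODO
--     temp = 0
--     flag = False
--     for i in puzzle:
--         if flag == True:
--             break;
--         for j in i:
--             if j == 0:
--                 flag = True
--                 break;
--             else: temp = temp + 1
--
--
--     return temp
-- ===== SOURCE B (Python) =====
-- def find_0_loc(puzzle):
--     flat = [v for row in puzzle for v in row]
--     try:
--         return flat.index(0)
--     except ValueError:
--         return len(flat)
-- ===== Notes on version B (the rewrite author's own statement) =====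
-- stated objective: simpler
-- what changed: B flattens the puzzle once and locates 0 with a single list.index search (len(flat) when absent), replacing A's nested loops with a break flag and a running counter.
import Mathlib
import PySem

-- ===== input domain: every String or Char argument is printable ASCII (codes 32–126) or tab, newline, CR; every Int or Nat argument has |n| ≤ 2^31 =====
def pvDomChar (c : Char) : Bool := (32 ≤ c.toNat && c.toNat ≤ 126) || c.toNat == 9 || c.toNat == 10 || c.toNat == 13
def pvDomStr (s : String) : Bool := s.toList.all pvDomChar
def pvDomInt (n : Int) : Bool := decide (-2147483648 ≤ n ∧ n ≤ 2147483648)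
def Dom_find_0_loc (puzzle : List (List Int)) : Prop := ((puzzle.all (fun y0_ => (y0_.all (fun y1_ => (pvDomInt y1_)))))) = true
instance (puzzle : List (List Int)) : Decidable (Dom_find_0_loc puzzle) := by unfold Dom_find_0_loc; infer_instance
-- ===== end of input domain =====

-- ===== PORT A =====
-- B flattens once and uses a single index search; A keeps a running counter with a break flag.
def find_0_loc (puzzle : List (List Int)) : Int :=
  (puzzle.foldl (fun (st : Int × Bool) i =>
    if st.2 = true then st
    else i.foldl (fun (s : Int × Bool) j =>
      if s.2 then s
      else if j = 0 then (s.1, true)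
      else (s.1 + 1, s.2)) st) ((0 : Int), false)).1

-- ===== PORT B =====
-- flat.index(0) with the ValueError branch returning len(flat)
def pvIndexOrLen (flat : List Int) : Int :=
  match PySem.List.index? flat 0 with
  | some i => (i : Int)
  | none => (flat.length : Int)

def find_0_loc_alt (puzzle : List (List Int)) : Int :=
  pvIndexOrLen (puzzle.flatMap (fun row => row))

-- ===== PRECONDITION & SPEC =====
def Spec_find_0_loc (puzzle : List (List Int)) (out : Int) : Prop := out = find_0_loc_alt puzzle
instance (puzzle : List (List Int)) (out : Int) : Decidable (Spec_find_0_loc puzzle out) := by unfold Spec_find_0_loc; infer_instance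

-- ===== CLAIM (what is proved, stated in full; the proofs are below) =====
def Claim_equal_find_0_loc : Prop := ∀ (puzzle : List (List Int)), Dom_find_0_loc puzzle → Spec_find_0_loc puzzle (find_0_loc puzzle)

-- ===== LEMMAS AND PROOFS =====

-- once the break flag is set, both loops leave the state untouched
theorem pv_inner_id (xs : List Int) (t : Int) :
    xs.foldl (fun (s : Int × Bool) j =>
      if s.2 then s
      else if j = 0 then (s.1, true)
      else (s.1 + 1, s.2)) (t, true) = (t, true) := by
  induction xs with
  | nil => rfl
  | cons x xs ih => simpa using ih

theorem pv_outer_id (l : List (List Int)) (a : Int) :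
    l.foldl (fun (st : Int × Bool) i =>
      if st.2 = true then st
      else i.foldl (fun (s : Int × Bool) j =>
        if s.2 then s
        else if j = 0 then (s.1, true)
        else (s.1 + 1, s.2)) st) (a, true) = (a, true) := by
  induction l with
  | nil => rfl
  | cons y ys ih => simpa using ih

theorem pv_index?_append_not_mem {α : Type} [DecidableEq α] (l t : List α) (v : α)
    (h : v ∉ l) :
    PySem.List.index? (l ++ t) v = (PySem.List.index? t v).map (· + l.length) := by
  induction l with
  | nil =>
    simp only [List.nil_append, List.length_nil]
    cases hv : PySem.List.index? t v <;> simp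
  | cons x xs ih =>
    have hx : x ≠ v := fun hxv => h (hxv ▸ List.mem_cons_self)
    rw [List.cons_append, PySem.List.index?_cons_of_ne (xs ++ t) hx,
      ih (fun hm => h (List.mem_cons_of_mem _ hm))]
    cases hv : PySem.List.index? t v
    · simp
    · simp; omega

-- inner loop from (t, false): counts to the first 0, or the whole row
theorem pv_inner (row : List Int) (t : Int) :
    row.foldl (fun (s : Int × Bool) j =>
      if s.2 then s
      else if j = 0 then (s.1, true)
      else (s.1 + 1, s.2)) (t, false) =
    (match PySem.List.index? row 0 with
     | some k => (t + (k : Int), true)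
     | none => (t + (row.length : Int), false)) := by
  induction row generalizing t with
  | nil => simp [PySem.List.index?]
  | cons x xs ih =>
    by_cases hx : x = 0
    · subst hx
      rw [PySem.List.index?_cons_self]
      simp [List.foldl, pv_inner_id]
    · rw [PySem.List.index?_cons_of_ne xs hx]
      simp only [List.foldl, Bool.false_eq_true, if_false, if_neg hx]
      rw [ih (t + 1)]
      cases h : PySem.List.index? xs 0 with
      | none => simp; ring
      | some k => simp; ring

theorem pv_outer (puzzle : List (List Int)) (t : Int) :
    (puzzle.foldl (fun (st : Int × Bool) i =>
      if st.2 = true then st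
      else i.foldl (fun (s : Int × Bool) j =>
        if s.2 then s
        else if j = 0 then (s.1, true)
        else (s.1 + 1, s.2)) st) (t, false)).1 =
    t + find_0_loc_alt puzzle := by
  induction puzzle generalizing t with
  | nil => simp [find_0_loc_alt, pvIndexOrLen, PySem.List.index?]
  | cons row rest ih =>
    simp only [List.foldl, Bool.false_eq_true, if_false]
    rw [pv_inner]
    cases h : PySem.List.index? row 0 with
    | some k =>
      have hmem : (0 : Int) ∈ row :=
        (PySem.List.index?_isSome_iff row 0).1 (by rw [h]; rfl)
      rw [pv_outer_id]
      unfold find_0_loc_alt pvIndexOrLen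
      rw [List.flatMap_cons, PySem.List.index?_append_of_mem _ hmem, h]
    | none =>
      have hnm : (0 : Int) ∉ row := (PySem.List.index?_eq_none_iff row 0).1 h
      rw [ih (t + row.length)]
      unfold find_0_loc_alt pvIndexOrLen
      rw [List.flatMap_cons, pv_index?_append_not_mem _ _ _ hnm]
      cases hr : PySem.List.index? (rest.flatMap fun r => r) 0 with
      | none => simp; ring
      | some k => simp; ring

-- ===== VERDICT (by name: the statement is the Claim_ definition above) =====
theorem find_0_loc_spec : Claim_equal_find_0_loc := by
  intro puzzle _
  unfold Spec_find_0_loc find_0_loc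
  simpa using pv_outer puzzle 0
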